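-- pv_equiv track=rewrite | github.com/anantkaushik/Competitive_Programming | Python/GeeksforGeeks/count-the-number-of-contiguous-increasing-and-decreasing-subsequences-in-a-sequence.py | num_of_subseq
-- ===== SOURCE A (Python) =====
-- def num_of_subseq(seq):
--     is_decreasing_regularly = is_increasing_regularly = False
--
--     increasing = decreasing = 0
--     for i in range(1, len(seq)):
--         if seq[i] > seq[i-1] and not is_increasing_regularly:
--             increasing += 1
--             is_increasing_regularly = True
--             is_decreasing_regularly = False
--         elif seq[i] < seq[i-1] and not   is_decreasing_regularly:
--             decreasing += 1
--             is_decreasing_regularly = True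
--             is_increasing_regularly = False
--
--     return increasing, decreasing
-- ===== SOURCE B (Python) =====
-- def num_of_subseq(seq):
--     # Pass 1: materialize the strict directions of adjacent pairs (equal pairs omitted).
--     dirs = []
--     for a, b in zip(seq, seq[1:]):
--         if b > a:
--             dirs.append(1)
--         elif b < a:
--             dirs.append(-1)
--     # Pass 2: count run starts — a direction differing from the previous one.
--     increasing = decreasing = 0
--     prev = 0
--     for d in dirs:
--         if d != prev:
--             if d == 1:
--                 increasing += 1
--             else:
--                 decreasing += 1
--             prev = d
--     return increasing, decreasing
-- ===== Notes on version B (the rewrite author's own statement) =====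
-- stated objective: alternative
-- what changed: Replaces the single fused loop with two boolean flags by a two-pass decomposition: first build the list of strict adjacent-pair directions (+1/-1, equal pairs dropped), then count run starts over that list with one prev tracker.
import Mathlib
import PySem

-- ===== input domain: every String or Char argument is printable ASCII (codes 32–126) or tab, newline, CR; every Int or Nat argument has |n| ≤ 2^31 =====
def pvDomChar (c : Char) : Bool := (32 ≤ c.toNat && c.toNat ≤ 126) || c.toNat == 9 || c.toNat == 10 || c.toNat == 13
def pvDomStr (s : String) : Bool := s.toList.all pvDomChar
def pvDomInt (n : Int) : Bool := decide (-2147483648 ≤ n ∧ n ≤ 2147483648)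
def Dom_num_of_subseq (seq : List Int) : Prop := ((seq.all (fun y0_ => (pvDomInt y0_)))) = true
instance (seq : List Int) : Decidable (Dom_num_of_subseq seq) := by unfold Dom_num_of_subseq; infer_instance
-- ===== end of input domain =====

-- B replaces A's fused flag-loop with a two-pass decomposition (build the strict
-- direction list, then count run starts); same O(n) cost, equivalence proved below.

-- ===== PORT A =====
-- loop state = (is_decreasing_regularly, is_increasing_regularly, increasing, decreasing)
def numOfSubseqStepA (seq : List Int) (s : Bool × Bool × Int × Int) (i : Int) :
    Bool × Bool × Int × Int :=
  if PySem.List.pyGetD seq i 0 > PySem.List.pyGetD seq (i-1) 0 ∧ s.2.1 = false then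
    (false, true, s.2.2.1 + 1, s.2.2.2)
  else if PySem.List.pyGetD seq i 0 < PySem.List.pyGetD seq (i-1) 0 ∧ s.1 = false then
    (true, false, s.2.2.1, s.2.2.2 + 1)
  else s

def num_of_subseq (seq : List Int) : Int × Int :=
  let st := (PySem.List.pyRange 1 (PySem.List.len seq) 1).foldl (numOfSubseqStepA seq)
      (false, false, 0, 0)
  (st.2.2.1, st.2.2.2)

-- ===== PORT B =====
-- pass-2 state = (prev, increasing, decreasing)
def numOfSubseqStepB (s : Int × Int × Int) (d : Int) : Int × Int × Int :=
  if d ≠ s.1 then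
    if d = 1 then (d, s.2.1 + 1, s.2.2) else (d, s.2.1, s.2.2 + 1)
  else s

def num_of_subseq_alt (seq : List Int) : Int × Int :=
  let dirs := (seq.zip seq.tail).foldl
      (fun (acc : List Int) p =>
        if p.2 > p.1 then acc ++ [(1 : Int)]
        else if p.2 < p.1 then acc ++ [(-1 : Int)]
        else acc) []
  let r := dirs.foldl numOfSubseqStepB (0, 0, 0)
  (r.2.1, r.2.2)

-- ===== PRECONDITION & SPEC =====
def Spec_num_of_subseq (seq : List Int) (out : Int × Int) : Prop := out = num_of_subseq_alt seq
instance (seq : List Int) (out : Int × Int) : Decidable (Spec_num_of_subseq seq out) := by unfold Spec_num_of_subseq; infer_instance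

-- ===== CLAIM (what is proved, stated in full; the proofs are below) =====
def Claim_equal_num_of_subseq : Prop := ∀ (seq : List Int), Dom_num_of_subseq seq → Spec_num_of_subseq seq (num_of_subseq seq)

-- ===== LEMMAS AND PROOFS =====

-- A's step, seen as a function of the adjacent pair it reads
def numOfSubseqStepAPair (s : Bool × Bool × Int × Int) (p : Int × Int) :
    Bool × Bool × Int × Int :=
  if p.2 > p.1 ∧ s.2.1 = false then (false, true, s.2.2.1 + 1, s.2.2.2)
  else if p.2 < p.1 ∧ s.1 = false then (true, false, s.2.2.1, s.2.2.2 + 1)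
  else s

theorem stepA_as_pair (seq : List Int) :
    numOfSubseqStepA seq =
      fun s i => numOfSubseqStepAPair s
        (PySem.List.pyGetD seq (i-1) 0, PySem.List.pyGetD seq i 0) := rfl

-- the direction of one adjacent pair (B's first pass, as a filterMap)
def numOfSubseqDir (p : Int × Int) : Option Int :=
  if p.2 > p.1 then some 1 else if p.2 < p.1 then some (-1) else none

-- A's indexed loop reads exactly the adjacent pairs.
theorem pairs_eq (seq : List Int) :
    (PySem.List.pyRange 1 (PySem.List.len seq) 1).map
      (fun i => (PySem.List.pyGetD seq (i-1) 0, PySem.List.pyGetD seq i 0)) =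
    seq.zip seq.tail := by
  apply List.ext_getElem
  · simp [PySem.List.length_pyRange_one]
  · intro k h1 h2
    have hk : k < seq.length - 1 := by
      simp [PySem.List.length_pyRange_one] at h1; omega
    simp only [List.getElem_map, PySem.List.getElem_pyRange_one, List.getElem_zip,
      List.getElem_tail]
    have e1 : (1:Int) + (k:Int) - 1 = (k:Int) := by ring
    have e2 : (1:Int) + (k:Int) = ((k+1 : Nat) : Int) := by push_cast; ring
    rw [e1, e2, PySem.List.pyGetD_natCast, PySem.List.pyGetD_natCast,
      List.getD_eq_getElem seq 0 (by omega), List.getD_eq_getElem seq 0 (by omega)]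

-- B's first pass is a filterMap of the pairs.
theorem dirs_eq (ps : List (Int × Int)) (acc : List Int) :
    ps.foldl
      (fun (acc : List Int) p =>
        if p.2 > p.1 then acc ++ [(1 : Int)]
        else if p.2 < p.1 then acc ++ [(-1 : Int)]
        else acc) acc = acc ++ ps.filterMap numOfSubseqDir := by
  induction ps generalizing acc with
  | nil => simp
  | cons p t ih =>
    simp only [List.foldl_cons, List.filterMap_cons]
    rw [ih]
    by_cases h1 : p.2 > p.1
    · simp [numOfSubseqDir, h1]
    · by_cases h2 : p.2 < p.1 <;> simp [numOfSubseqDir, h1, h2]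

-- the two folds stay related: flags ↔ prev ∈ {1, -1}
theorem loops_eq (ps : List (Int × Int)) (isDec isInc : Bool) (inc dec prev : Int)
    (h1 : isInc = true ↔ prev = 1) (h2 : isDec = true ↔ prev = -1) :
    (((ps.foldl numOfSubseqStepAPair (isDec, isInc, inc, dec)).2.2.1,
      (ps.foldl numOfSubseqStepAPair (isDec, isInc, inc, dec)).2.2.2) : Int × Int) =
    (((ps.filterMap numOfSubseqDir).foldl numOfSubseqStepB (prev, inc, dec)).2.1,
     ((ps.filterMap numOfSubseqDir).foldl numOfSubseqStepB (prev, inc, dec)).2.2) := by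
  induction ps generalizing isDec isInc inc dec prev with
  | nil => rfl
  | cons p t ih =>
    simp only [List.foldl_cons, List.filterMap_cons, numOfSubseqDir,
      numOfSubseqStepAPair]
    rcases lt_trichotomy p.1 p.2 with h | h | h
    · -- strictly increasing pair
      cases hi : isInc
      · have hp : prev ≠ 1 := fun hc => by simp [h1.mpr hc] at hi
        simp [numOfSubseqStepB, h, Ne.symm hp]
        exact ih _ _ _ _ _ (by simp) (by simp)
      · have hp : prev = 1 := h1.mp hi
        subst hp
        simp only [h]
        simp [numOfSubseqStepB, not_lt.mpr (le_of_lt h)]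
        exact ih _ _ _ _ _ (by simp) (by simpa using h2)
    · -- equal pair: both loops skip
      simp [h]
      exact ih _ _ _ _ _ h1 h2
    · -- strictly decreasing pair
      cases hd : isDec
      · have hp : prev ≠ -1 := fun hc => by simp [h2.mpr hc] at hd
        simp [numOfSubseqStepB, h, Ne.symm hp, not_lt.mpr (le_of_lt h)]
        exact ih _ _ _ _ _ (by simp) (by simp)
      · have hp : prev = -1 := h2.mp hd
        subst hp
        simp only [h]
        simp [numOfSubseqStepB, not_lt.mpr (le_of_lt h)]
        exact ih _ _ _ _ _ (by simpa using h1) (by simp)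

-- ===== VERDICT (by name: the statement is the Claim_ definition above) =====
theorem num_of_subseq_spec : Claim_equal_num_of_subseq := by
  intro seq _
  unfold Spec_num_of_subseq num_of_subseq num_of_subseq_alt
  rw [dirs_eq, stepA_as_pair, ← List.foldl_map, pairs_eq, List.nil_append]
  exact loops_eq (seq.zip seq.tail) false false 0 0 0 (by simp) (by simp)
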